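/- GENERATED by farm/worked/mk_tree_copies.py from farm/worked/get8_packet/Proof.lean (a worked proof of the farm's unit `get8_packet`,
   accepted by the verdict) — do not edit. -/
import Asan.CheckWalk
import Vorbis.Spec.Units.get8_packet

open X86 X86.User Asan Vorbis

set_option maxRecDepth 4000
set_option maxHeartbeats 4000000

/-- `get8_packet(f)` satisfies its contract: a call of `get8_packet_raw` (a contract function of the same group), then the checked
store `f->valid_bits = 0`; the callee's footprint is carried into this function's own with `Reader.sameExcept_through_callee`. -/
theorem Vorbis.Spec.Worked.get8_packet_ok : Vorbis.Spec.get8_packet.Statement := by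
  intro Lay hLay μ hμ u₀ hcode h_raw hstore4 others frames Blk len u ret he hpre
  v_entry he
  have hraw := h_raw others frames Blk len
  have hsp := hpre.shadow.rsp
  have hwhere := hpre.where_obj
  u_walk hcode [hμ.vendor] span [Vorbis.L.textLo, Vorbis.L.textHi] side (v_side)
  case call_inv =>
    refine Vorbis.abiInv_of ?_ ?_
    · rw [w_flags]
      simp only [X86.User.df_setStatus]
      exact he_df
    · rw [w_mxcsr]
      exact he_mx
  case pre_10d049 =>
    have hun : ShadowUntouched u.mem s_10d049.mem := by v_untouched
    have hrdi : s_10d049.reg .rdi = u.reg .rdi := w_kept.get .rdi rfl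
    refine hpre.again (hpre.shadow.call hun (by u_omega) (by u_omega) (by u_omega)) hrdi ?_
    have hsame : Mem.SameExcept [⟨(u.reg .rsp).toNat - 32, (u.reg .rsp).toNat⟩] u.mem s_10d049.mem := by
      u_same
    exact (Vorbis.Spec.Reader.reader_of_window hpre.bits hsame (by omega)).1
  -- the returned state
  have w_eq := Vorbis.conv_code_eqOn w_code
  have c_rdi : s_10d049.reg .rdi = u.reg .rdi := w_kept_10d049.get .rdi rfl
  simp only [X86.User.Spec.footprint, vspec, w_rsp_10d049, c_rdi] at w_same
  have hp1 : UInt64.ofNat (s_10d049.mem.readLE (u.reg .rsp - 8) 8) = u.reg .rbp := by u_resolve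
  have hp2 : UInt64.ofNat (s_10d049.mem.readLE (u.reg .rsp - 16) 8) = u.reg .rbx := by u_resolve
  have hp0 : UInt64.ofNat (s_10d049.mem.readLE (u.reg .rsp) 8) = ret := by u_resolve
  have hs1 : UInt64.ofNat (s_10d049r.mem.readLE (u.reg .rsp - 8) 8) = u.reg .rbp := by u_frame hp1
  have hs2 : UInt64.ofNat (s_10d049r.mem.readLE (u.reg .rsp - 16) 8) = u.reg .rbx := by u_frame hp2
  have hs0 : UInt64.ofNat (s_10d049r.mem.readLE (u.reg .rsp) 8) = ret := by u_frame hp0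
  clear hp1 hp2 hp0
  -- the callee's footprint over the memory at this function's entry
  rw [w_mem_10d049] at w_same
  have hpost : Vorbis.Spec.PacketRawPost Blk len (s_10d049.reg .rdi).toNat s_10d049 s_10d049r := w_post
  rw [c_rdi] at hpost
  u_walk hcode [hμ.vendor] span [Vorbis.L.textLo, Vorbis.L.textHi] side (v_side)
  · -- the check of the store
    have hun : ShadowUntouched u.mem s_10d057.mem := by v_untouched
    refine hpre.env.obj.accSmall hpre.shadow.inv hun _ 4 (by decide) (by u_omega) ?_
    simp only [Vorbis.Off.sizeof.stb_vorbis]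
    u_omega
  · refine ReachVia.done ?_
    -- the footprint up to the callee's return: the pushes, then the callee's windows, each inside one of this function's
    have hcallee : Mem.SameExcept
        [⟨(u.reg .rsp).toNat - 288, (u.reg .rsp).toNat⟩,
         ⟨(u.reg .rdi).toNat + 48, (u.reg .rdi).toNat + 56⟩, ⟨(u.reg .rdi).toNat + 84, (u.reg .rdi).toNat + 96⟩,
         ⟨(u.reg .rdi).toNat + 136, (u.reg .rdi).toNat + 144⟩, ⟨(u.reg .rdi).toNat + 1484, (u.reg .rdi).toNat + 1749⟩,
         ⟨(u.reg .rdi).toNat + 1752, (u.reg .rdi).toNat + 1764⟩, ⟨(u.reg .rdi).toNat + 1768, (u.reg .rdi).toNat + 1784⟩]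
        u.mem s_10d049r.mem := by
      refine Vorbis.Spec.Reader.sameExcept_through_callee ?_ w_same ?_
      · u_same
      · simp only [List.forall_mem_cons, List.not_mem_nil, false_imp_iff, implies_true, and_true, X86.User.inSpans_cons,
          X86.User.inSpans_nil, or_false]
        repeat' apply And.intro
        all_goals u_omega
    -- DF and the MXCSR masks at the `ret`: the callee returned them (`w_inv`), the check kept DF (`w_df_10d057`)
    have hdf : s_10d06e.flags .df = false := by
      rw [w_flags]
      simp only [X86.User.df_setStatus]
      rw [w_df_10d057]
      exact w_inv.1
    have hmx : s_10d06e.mxcsr &&& 0x1F80 = 0x1F80 := by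
      rw [w_mxcsr]
      exact w_inv.2
    v_returned
    · -- the postcondition (`v_returned` leaves the post first)
      show Vorbis.Spec.Get8PacketPost Blk len (u.reg .rdi).toNat u s_10d06e
      -- the memory at the call: this function's pushes are off `*f`
      have hS01 : Mem.SameExcept [⟨(u.reg .rsp).toNat - 32, (u.reg .rsp).toNat⟩] u.mem s_10d049.mem := by
        u_same
      obtain ⟨hb1, hmu1⟩ := Vorbis.Spec.Reader.reader_of_window hpre.bits hS01 (by omega)
      -- the memory after the call: the callee's post
      have hb2 := hpost.reader.bits
      have hmu2 := hpost.reader.mu_le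
      -- the return address of the check call is pushed off `*f`
      have hS23 : Mem.SameExcept [⟨(u.reg .rsp).toNat - 32, (u.reg .rsp).toNat - 24⟩] s_10d049r.mem
          (s_10d049r.mem.writeLE (u.reg .rsp - 32) 8 1101916) := by
        u_same
      obtain ⟨hb3, hmu3⟩ := Vorbis.Spec.Reader.reader_of_window hb2 hS23 (by omega)
      -- the store `f->valid_bits = 0`
      have ea : u.reg .rdi + 1768 = addr ((u.reg .rdi).toNat + 1768) := by
        rw [← addr_add_lit, addr_toNat]
      have hst : Bits Blk len ((s_10d049r.mem.writeLE (u.reg .rsp - 32) 8 1101916).writeLE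
            (addr ((u.reg .rdi).toNat + 1768)) 4 0) (u.reg .rdi).toNat ∧
          stb_vorbis.valid_bits ((s_10d049r.mem.writeLE (u.reg .rsp - 32) 8 1101916).writeLE
            (addr ((u.reg .rdi).toNat + 1768)) 4 0) (u.reg .rdi).toNat = 0 :=
        hb3.store_valid_bits 0#32 (by decide)
      have hmu4 := hb3.mu_store_other 1768 4 0 (by omega) (by omega) (by omega) (by omega) (by omega) (by omega)
      -- the result: `mov ebp, eax … mov eax, ebp` gives the callee's result back
      have hres : s_10d06e.reg .rax = s_10d049r.reg .rax := by
        rw [w_rax]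
        apply Vorbis.Spec.Reader.ofBV_part32_of_lt
        rcases hpost.result with h | h
        · rw [h]
          decide
        · omega
      refine ⟨by v_untouched, ⟨?_, ?_⟩, ?_, ?_, ?_⟩
      · rw [w_mem, ea]
        exact hst.1
      · rw [w_mem, ea]
        omega
      · rw [hres]
        exact hpost.result
      · intro hne
        rw [hres] at hne
        have hlt := hpost.strict hne
        rw [w_mem, ea]
        omega
      · rw [w_mem, ea]
        exact hst.2
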